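-- pv_equiv track=rewrite | github.com/jvaughan0707/AOC | 2022/22.py | simplifyDirectionPath
-- ===== SOURCE A (Python) =====
-- def simplifyDirectionPath(path, turnCount = 0):
--     # take a sequence of directions from one face to another, e.g. 1,1,2 (D,D,L), and collapse it into a single direction and rotation.
--     # rotation is the number of 90 deg clockwise turns that a path would take when going from one face to the next
--
--     if len(path) == 1:
--         return path[0], turnCount
--     if len(path) == 2:
--         if path[0] == path[1]:
--             return -1, 0
--         return path[1], ((path[0] - path[1]) + turnCount) % 4
--
--     # find a consecutive pair of different directions, collapse it and then substitute that back into the list and continue processing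
--     for i in range(len(path) - 1):
--         if path[i] == path[i + 1]:
--             continue
--
--         d, t = simplifyDirectionPath([path[i],path[i + 1]])
--
--         # any directions after the collapsed pair need to be rotated by the amount of rotation they produce.
--         # negative because the face is rotated in the opposite direction relative to the path
--         return simplifyDirectionPath(path[:i] + [d] + [(d2 - t) % 4 for d2 in path[i + 2:]], (turnCount + t) % 4)
--
--     return path[0] + 2, turnCount
-- ===== SOURCE B (Python) =====
-- def simplifyDirectionPath(path, turnCount=0):
--     # Single left-to-right pass over the runs of the path: each run of m equal
--     # directions followed by a different one contributes m clockwise quarter-turns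
--     # of t = (run - next) % 4, which also rotates everything still to come.
--     d = path[0]
--     T = turnCount
--     R = 0            # accumulated rotation applied to not-yet-seen elements
--     collapsed = False
--     m = 1            # length of the current (final-so-far) run
--     for e in path[1:]:
--         if collapsed:
--             e = (e - R) % 4
--         if e == d:
--             m += 1
--         else:
--             t = (d - e) % 4
--             T = (T + m * t) % 4
--             R = (R + m * t) % 4
--             d = e
--             m = 1
--             collapsed = True
--     if m == 1:
--         return d, T
--     if m == 2:
--         return -1, 0
--     return d + 2, T
-- ===== Notes on version B (the rewrite author's own statement) =====
-- stated objective: faster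
-- what changed: A repeatedly finds the first unequal adjacent pair, rebuilds the whole list with the tail re-rotated and recurses once per collapse; B makes a single left-to-right pass over the runs, threading the accumulated turn and a pending rotation applied lazily to each element as it is read, then classifies the final run length (1, 2, or more).
-- outside the precondition, e.g. on simplifyDirectionPath([], 0): A raises IndexError, B raises IndexError
import Mathlib
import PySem

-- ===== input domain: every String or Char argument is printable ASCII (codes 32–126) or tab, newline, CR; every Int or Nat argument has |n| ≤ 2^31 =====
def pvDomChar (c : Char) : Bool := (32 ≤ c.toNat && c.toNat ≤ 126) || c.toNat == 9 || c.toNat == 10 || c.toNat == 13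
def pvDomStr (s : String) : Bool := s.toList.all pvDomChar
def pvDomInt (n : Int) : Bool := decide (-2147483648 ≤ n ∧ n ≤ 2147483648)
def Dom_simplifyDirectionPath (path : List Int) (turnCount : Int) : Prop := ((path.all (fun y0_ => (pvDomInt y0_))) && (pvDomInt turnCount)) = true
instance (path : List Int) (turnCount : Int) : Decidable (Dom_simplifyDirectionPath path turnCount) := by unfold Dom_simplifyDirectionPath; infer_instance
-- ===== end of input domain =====

-- B replaces A's collapse-and-recurse (rebuilding the list once per collapse) with one
-- left-to-right pass over the runs, threading the accumulated rotation (objective: faster).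


-- ===== PORT A =====

-- the `for i in range(len(path)-1): if path[i] == path[i+1]: continue …` scan: first index i
-- with path[i] ≠ path[i+1] (none if every consecutive pair is equal, incl. len < 2)
def firstUnequal : List Int → Nat → Option Nat
  | a :: b :: rest, i => if a = b then firstUnequal (b :: rest) (i + 1) else some i
  | _, _ => none

-- bounds of the index the scan returns (cited by the port's decreasing_by)
theorem firstUnequal_le (l : List Int) (k i : Nat) (h : firstUnequal l k = some i) :
    k ≤ i ∧ i + 2 ≤ l.length + k := by
  induction l generalizing k with
  | nil => simp [firstUnequal] at h
  | cons a rest ih =>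
    match rest with
    | [] => simp [firstUnequal] at h
    | b :: rest' =>
      simp only [firstUnequal] at h
      split at h
      · have := ih (k + 1) h
        simp only [List.length_cons] at *
        omega
      · cases h
        simp only [List.length_cons]
        omega

def simplifyDirectionPath (path : List Int) (turnCount : Int) : Int × Int :=
  if path.length = 1 then
    ((PySem.List.pyGet? path 0).getD 0, turnCount)
  else if path.length = 2 then
    let p0 := (PySem.List.pyGet? path 0).getD 0
    let p1 := (PySem.List.pyGet? path 1).getD 0
    if p0 = p1 then (-1, 0)
    else (p1, PySem.Int.mod ((p0 - p1) + turnCount) 4)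
  else
    match h : firstUnequal path 0 with
    | some i =>
      let a := (PySem.List.pyGet? path (Int.ofNat i)).getD 0
      let b := (PySem.List.pyGet? path (Int.ofNat i + 1)).getD 0
      let dt := simplifyDirectionPath [a, b] 0
      -- path[:i] = take i and path[i+2:] = drop (i+2): exact, since 0 ≤ i ≤ len(path) - 2 here
      simplifyDirectionPath
        (path.take i ++ [dt.1] ++ (path.drop (i + 2)).map (fun d2 => PySem.Int.mod (d2 - dt.2) 4))
        (PySem.Int.mod (turnCount + dt.2) 4)
    | none => ((PySem.List.pyGet? path 0).getD 0 + 2, turnCount)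
termination_by path.length
decreasing_by
  · have := firstUnequal_le path 0 i h
    simp only [List.length_cons, List.length_nil]
    omega
  · have := firstUnequal_le path 0 i h
    simp only [List.length_append, List.length_take, List.length_map, List.length_drop,
      List.length_cons, List.length_nil]
    omega

-- ===== PORT B =====

-- one fold step over state (d, T, R, collapsed, m): current direction, accumulated turn,
-- rotation pending on unseen elements, whether any collapse happened yet, current run length
def altStep (s : Int × Int × Int × Bool × Int) (e : Int) : Int × Int × Int × Bool × Int :=
  match s with
  | (d, T, R, c, m) =>
    let e' := if c then PySem.Int.mod (e - R) 4 else e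
    if e' = d then (d, T, R, c, m + 1)
    else
      let t := PySem.Int.mod (d - e') 4
      (e', PySem.Int.mod (T + m * t) 4, PySem.Int.mod (R + m * t) 4, true, 1)

def altFin (s : Int × Int × Int × Bool × Int) : Int × Int :=
  match s with
  | (d, T, _, _, m) =>
    if m = 1 then (d, T) else if m = 2 then (-1, 0) else (d + 2, T)

def simplifyDirectionPath_alt (path : List Int) (turnCount : Int) : Int × Int :=
  match path with
  | [] => (0, 0)  -- Python B raises IndexError on []; excluded by Pre_
  | p0 :: rest => altFin (rest.foldl altStep (p0, turnCount, 0, false, 1))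

-- ===== PRECONDITION & SPEC =====

-- Pre_ excludes only the empty list, on which both Pythons raise IndexError.
def Pre_simplifyDirectionPath (path : List Int) (turnCount : Int) : Prop := path ≠ []
instance (path : List Int) (turnCount : Int) : Decidable (Pre_simplifyDirectionPath path turnCount) := by unfold Pre_simplifyDirectionPath; infer_instance

def pvWitness_simplifyDirectionPath : List Int × Int := ([1, 1, 2], 0)

def Spec_simplifyDirectionPath (path : List Int) (turnCount : Int) (out : Int × Int) : Prop := out = simplifyDirectionPath_alt path turnCount
instance (path : List Int) (turnCount : Int) (out : Int × Int) : Decidable (Spec_simplifyDirectionPath path turnCount out) := by unfold Spec_simplifyDirectionPath; infer_instance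

-- ===== CLAIM (what is proved, stated in full; the proofs are below) =====
def Claim_equal_simplifyDirectionPath : Prop := ∀ (path : List Int) (turnCount : Int), Dom_simplifyDirectionPath path turnCount → Pre_simplifyDirectionPath path turnCount → Spec_simplifyDirectionPath path turnCount (simplifyDirectionPath path turnCount)

-- ===== LEMMAS AND PROOFS =====

theorem pymod4 (x : Int) : PySem.Int.mod x 4 = x % 4 :=
  PySem.Int.mod_eq_emod_of_pos (by norm_num)

theorem altStep_true (d T R m e : Int) :
    altStep (d, T, R, true, m) e =
      if (e - R) % 4 = d then (d, T, R, true, m + 1)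
      else ((e - R) % 4, (T + m * ((d - (e - R) % 4) % 4)) % 4,
            (R + m * ((d - (e - R) % 4) % 4)) % 4, true, 1) := by
  simp [altStep]

theorem altStep_false (d T R m e : Int) :
    altStep (d, T, R, false, m) e =
      if e = d then (d, T, R, false, m + 1)
      else (e, (T + m * ((d - e) % 4)) % 4, (R + m * ((d - e) % 4)) % 4, true, 1) := by
  simp [altStep]

-- a run of equal raw elements before any collapse just grows m
theorem runFold (k : Nat) (a T m : Int) :
    List.foldl altStep (a, T, 0, false, m) (List.replicate k a) = (a, T, 0, false, m + k) := by
  induction k generalizing m with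
  | zero => simp
  | succ k ih =>
    rw [List.replicate_succ, List.foldl_cons, altStep_false, if_pos rfl, ih,
      show m + 1 + (k : Int) = m + ((k + 1 : Nat) : Int) by push_cast; ring]

theorem alt_cons (p0 : Int) (rest : List Int) (T : Int) :
    simplifyDirectionPath_alt (p0 :: rest) T
      = altFin (rest.foldl altStep (p0, T, 0, false, 1)) := rfl

-- folding a tail rotated by t with pending rotation R1 = folding the raw tail with R2 ≡ R1 + t
theorem rotFold (l : List Int) (t d T R1 R2 m : Int) (h : (R2 - R1 - t) % 4 = 0) :
    altFin (List.foldl altStep (d, T, R1, true, m) (l.map (fun x => (x - t) % 4)))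
      = altFin (List.foldl altStep (d, T, R2, true, m) l) := by
  induction l generalizing d T R1 R2 m with
  | nil => simp [altFin]
  | cons e l ih =>
    simp only [List.map_cons, List.foldl_cons, altStep_true]
    have hval : ((e - t) % 4 - R1) % 4 = (e - R2) % 4 := by omega
    rw [hval]
    by_cases hd : (e - R2) % 4 = d
    · rw [if_pos hd, if_pos hd]
      exact ih d T R1 R2 (m + 1) h
    · rw [if_neg hd, if_neg hd]
      apply ih
      generalize m * ((d - (e - R2) % 4) % 4) = u
      omega

-- same, starting from an uncollapsed state (raw element = already-rotated element)
theorem rotFold0 (l : List Int) (t d T R2 m : Int) (h : (R2 - t) % 4 = 0) :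
    altFin (List.foldl altStep (d, T, 0, false, m) (l.map (fun x => (x - t) % 4)))
      = altFin (List.foldl altStep (d, T, R2, true, m) l) := by
  induction l generalizing d T m with
  | nil => simp [altFin]
  | cons e l ih =>
    simp only [List.map_cons, List.foldl_cons, altStep_true, altStep_false]
    have hval : (e - t) % 4 = (e - R2) % 4 := by omega
    rw [hval]
    by_cases hd : (e - R2) % 4 = d
    · rw [if_pos hd, if_pos hd]
      exact ih d T (m + 1)
    · rw [if_neg hd, if_neg hd]
      apply rotFold
      generalize m * ((d - (e - R2) % 4) % 4) = u
      omega

-- if the scan finds nothing, the list is one run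
theorem firstUnequal_none_run (l : List Int) (a : Int) (k : Nat)
    (h : firstUnequal (a :: l) k = none) : ∀ x ∈ l, x = a := by
  induction l generalizing a k with
  | nil => simp
  | cons b l ih =>
    simp only [firstUnequal] at h
    split at h
    · rename_i hab
      intro x hx
      rcases List.mem_cons.mp hx with hx | hx
      · exact hx.trans hab.symm
      · exact (ih b (k + 1) h x hx).trans hab.symm
    · simp at h

-- if the scan returns i, the list is a run of i-k+1 equal elements, a different one, a tail
theorem firstUnequal_some_run (l : List Int) (k i : Nat) (h : firstUnequal l k = some i) :
    ∃ a b tail, k ≤ i ∧ l = List.replicate (i - k + 1) a ++ b :: tail ∧ a ≠ b := by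
  induction l generalizing k with
  | nil => simp [firstUnequal] at h
  | cons a rest ih =>
    match rest with
    | [] => simp [firstUnequal] at h
    | b :: rest' =>
      simp only [firstUnequal] at h
      split at h
      · rename_i hab
        obtain ⟨a', b', tail, hk, hl, hne⟩ := ih (k + 1) h
        have hxa : a = a' := by
          rw [List.replicate_succ, List.cons_append] at hl
          injection hl with hba' _
          exact hab.trans hba'
        subst hxa
        refine ⟨a, b', tail, by omega, ?_, hne⟩
        have hik : i - k + 1 = (i - (k + 1) + 1) + 1 := by omega
        rw [hik, List.replicate_succ, List.cons_append, hl]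
      · rename_i hne
        cases h
        exact ⟨a, b, rest', Nat.le_refl _, by simp, hne⟩

-- the inner two-element recursive call
theorem inner_pair (a b : Int) (h : a ≠ b) :
    simplifyDirectionPath [a, b] 0 = (b, PySem.Int.mod (a - b) 4) := by
  rw [simplifyDirectionPath]
  simp [PySem.List.pyGet?, PySem.List.pyIdx?, h]

-- one collapse of A preserves B\'s value
theorem altCollapse (i : Nat) (a b : Int) (tail : List Int) (tc : Int) (hab : a ≠ b) :
    simplifyDirectionPath_alt
        (List.replicate i a ++ [b] ++
          tail.map (fun x => PySem.Int.mod (x - PySem.Int.mod (a - b) 4) 4))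
        (PySem.Int.mod (tc + PySem.Int.mod (a - b) 4) 4)
      = simplifyDirectionPath_alt (List.replicate (i + 1) a ++ b :: tail) tc := by
  have hba : b ≠ a := fun h => hab h.symm
  simp only [pymod4]
  cases i with
  | zero =>
    simp only [List.replicate, List.nil_append, List.singleton_append, alt_cons,
      List.foldl_cons, altStep_false, if_neg hba, one_mul, zero_add]
    apply rotFold0
    omega
  | succ j =>
    rw [show List.replicate (j + 1) a ++ [b] ++
          tail.map (fun x => (x - (a - b) % 4) % 4)
        = a :: (List.replicate j a ++ [b] ++ tail.map (fun x => (x - (a - b) % 4) % 4)) by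
      rw [List.replicate_succ]; simp]
    rw [show List.replicate (j + 1 + 1) a ++ b :: tail
        = a :: ((List.replicate (j + 1) a ++ [b]) ++ tail) by
      rw [List.replicate_succ]; simp]
    rw [alt_cons, alt_cons, List.foldl_append, List.foldl_append, List.foldl_append,
      List.foldl_append, runFold, runFold]
    simp only [List.foldl_cons, List.foldl_nil]
    rw [altStep_false, if_neg hba, altStep_false, if_neg hba]
    have hT : ((tc + (a - b) % 4) % 4 + (1 + (j : Int)) * ((a - b) % 4)) % 4
        = (tc + (1 + ((j : Nat) + 1 : Nat)) * ((a - b) % 4)) % 4 := by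
      push_cast
      have : (1 + ((j : Int) + 1)) * ((a - b) % 4)
          = (1 + (j : Int)) * ((a - b) % 4) + (a - b) % 4 := by ring
      rw [this]
      generalize (1 + (j : Int)) * ((a - b) % 4) = u
      omega
    rw [hT]
    apply rotFold
    push_cast
    have : (1 + ((j : Int) + 1)) * ((a - b) % 4)
        = (1 + (j : Int)) * ((a - b) % 4) + (a - b) % 4 := by ring
    rw [this]
    generalize (1 + (j : Int)) * ((a - b) % 4) = u
    omega

theorem main_aux (n : Nat) : ∀ (path : List Int) (tc : Int), path.length ≤ n → path ≠ [] →
    simplifyDirectionPath path tc = simplifyDirectionPath_alt path tc := by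
  induction n with
  | zero =>
    intro path tc hlen hne
    cases path with
    | nil => exact absurd rfl hne
    | cons a l => simp at hlen
  | succ n ih =>
    intro path tc hlen hne
    match path, hne with
    | [x], _ =>
      rw [simplifyDirectionPath]
      simp [PySem.List.pyGet?, PySem.List.pyIdx?, simplifyDirectionPath_alt, altFin]
    | [x, y], _ =>
      have hA : simplifyDirectionPath [x, y] tc
          = if x = y then (-1, 0) else (y, PySem.Int.mod ((x - y) + tc) 4) := by
        rw [simplifyDirectionPath]
        norm_num [PySem.List.pyGet?, PySem.List.pyIdx?]
      rw [hA, alt_cons]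
      simp only [List.foldl_cons, List.foldl_nil, altStep_false]
      by_cases hxy : x = y
      · subst hxy
        simp [altFin]
      · rw [if_neg hxy, if_neg (fun h => hxy h.symm)]
        norm_num [altFin, pymod4, Prod.mk.injEq]
        omega
    | x :: y :: z :: rest, _ =>
      rw [simplifyDirectionPath]
      have h1 : (x :: y :: z :: rest).length ≠ 1 := by simp
      have h2 : (x :: y :: z :: rest).length ≠ 2 := by simp
      rw [if_neg h1, if_neg h2]
      split
      · rename_i i hfu
        obtain ⟨a, b, tail, -, hl, hab⟩ := firstUnequal_some_run _ 0 i hfu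
        simp only [Nat.sub_zero] at hl
        have hga : (PySem.List.pyGet? (x :: y :: z :: rest) (Int.ofNat i)).getD 0 = a := by
          rw [hl, show (Int.ofNat i) = ((i : Nat) : Int) from rfl, PySem.List.pyGet?_natCast,
            List.getElem?_append_left (by simp), List.getElem?_replicate, if_pos (by omega)]
          rfl
        have hgb : (PySem.List.pyGet? (x :: y :: z :: rest) (Int.ofNat i + 1)).getD 0 = b := by
          rw [hl, show (Int.ofNat i + 1) = (((i + 1 : Nat)) : Int) by
              rw [Int.ofNat_eq_natCast]; push_cast; ring,
            PySem.List.pyGet?_natCast,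
            List.getElem?_append_right (by simp), List.length_replicate]
          simp
        have htake : (x :: y :: z :: rest).take i = List.replicate i a := by
          rw [hl, List.take_append_of_le_length (by simp), List.take_replicate,
            Nat.min_eq_left (by omega)]
        have hdrop : (x :: y :: z :: rest).drop (i + 2) = tail := by
          rw [hl, show i + 2 = (List.replicate (i + 1) a).length + 1 by simp,
            List.drop_append]
          simp
        simp only [hga, hgb, inner_pair a b hab, htake, hdrop]
        have hlen' : (List.replicate i a ++ [b] ++
            tail.map (fun d2 => PySem.Int.mod (d2 - PySem.Int.mod (a - b) 4) 4)).length ≤ n := by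
          have hL : (x :: y :: z :: rest).length = i + 2 + tail.length := by
            rw [hl]; simp; omega
          simp only [List.length_append, List.length_replicate, List.length_map,
            List.length_cons, List.length_nil]
          simp only [List.length_cons] at hL hlen
          omega
        rw [ih _ _ hlen' (by simp)]
        rw [hl]
        exact altCollapse i a b tail tc hab
      · rename_i hfu
        have hrun : ∀ w ∈ y :: z :: rest, w = x := firstUnequal_none_run _ x 0 hfu
        have hrep : y :: z :: rest = List.replicate (rest.length + 2) x := by
          rw [List.eq_replicate_iff]
          exact ⟨by simp, hrun⟩
        have hg0 : (PySem.List.pyGet? (x :: y :: z :: rest) 0).getD 0 = x := by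
          have h : (0:Int) ≤ (rest.length : Int) + 1 + 1 := by positivity
          simp [PySem.List.pyGet?, PySem.List.pyIdx?, h]
        rw [hg0, show (x :: y :: z :: rest) = x :: (y :: z :: rest) from rfl, alt_cons, hrep,
          runFold]
        simp only [altFin]
        rw [if_neg (by push_cast; omega), if_neg (by push_cast; omega)]

-- ===== VERDICT (by name: the statement is the Claim_ definition above) =====
theorem simplifyDirectionPath_spec : Claim_equal_simplifyDirectionPath := by
  intro path tc _ hpre
  unfold Spec_simplifyDirectionPath
  exact main_aux path.length path tc le_rfl hpre
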